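-- pv_equiv track=rewrite | github.com/Geon-05/dailycoding | programmers_코딩테스트/programmers_입문/day21/day21_4.py | solution
-- ===== SOURCE A (Python) =====
-- def solution(spell, dic:list):
--     answer = 2
--     tmp = ''
--     for i in dic:
--         i = sorted(i)
--         for j in spell:
--             if j in i:
--                 i.remove(j)
--             else:
--                 i.append('zz')
--         if i == []:
--             answer = 1
--             break
--     return answer
-- ===== SOURCE B (Python) =====
-- def solution(spell, dic):
--     need = {}
--     for ch in spell:
--         need[ch] = need.get(ch, 0) + 1
--     for word in dic:
--         have = {}
--         for ch in word:
--             have[ch] = have.get(ch, 0) + 1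
--         if have == need:
--             return 1
--     return 2
-- ===== Notes on version B (the rewrite author's own statement) =====
-- stated objective: simpler
-- what changed: B compares character-frequency dictionaries (Counter-style tables built with dict.get) instead of A's sort/remove/'zz'-sentinel shrinking-list loop, which does a linear membership scan and removal per spell letter.
-- outside the precondition, e.g. on solution(['zz', 'zz'], ['']): A returns 1, B returns 2
import Mathlib
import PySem

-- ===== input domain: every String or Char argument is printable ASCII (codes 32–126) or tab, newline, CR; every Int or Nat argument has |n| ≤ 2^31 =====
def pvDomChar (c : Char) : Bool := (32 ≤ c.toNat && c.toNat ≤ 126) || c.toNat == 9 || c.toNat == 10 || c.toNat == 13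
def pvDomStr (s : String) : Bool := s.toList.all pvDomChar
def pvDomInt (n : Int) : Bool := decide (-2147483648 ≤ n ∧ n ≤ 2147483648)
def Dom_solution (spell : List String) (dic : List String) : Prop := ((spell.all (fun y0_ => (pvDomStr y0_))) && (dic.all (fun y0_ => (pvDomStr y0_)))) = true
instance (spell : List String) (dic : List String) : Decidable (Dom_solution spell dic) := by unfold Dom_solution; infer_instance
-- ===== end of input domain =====

-- B replaces A's sort/remove/'zz'-sentinel inner loop by character-frequency tables (simpler); proved equal on spells not containing the string "zz".

-- ===== PORT A =====
-- one pass of A's inner loop: 'if j in i: i.remove(j) else: i.append("zz")'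
def pvStepA (i : List String) (j : String) : List String :=
  if j ∈ i then (PySem.List.remove? i j).getD i else i ++ ["zz"]

-- A's outer loop over dic with the early 'break' on a match
def pvLoopA (spell : List String) : List String → Int
  | [] => 2
  | w :: rest =>
      if spell.foldl pvStepA
          (PySem.List.sorted (w.toList.map (fun c => String.ofList [c])) (fun x => x) false) = []
      then 1 else pvLoopA spell rest

def solution (spell : List String) (dic : List String) : Int :=
  pvLoopA spell dic

-- ===== PORT B =====
-- the frequency-table loop 'd[ch] = d.get(ch, 0) + 1'
def pvCount (l : List String) : PySem.Dict String Int :=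
  l.foldl (fun d x => d.modify x 0 (fun v => v + 1)) PySem.Dict.empty

-- Python dict equality: same key set, same value at every key (insertion order ignored)
def pvDictEq (d1 d2 : PySem.Dict String Int) : Bool :=
  d1.items.all (fun kv => d2.get? kv.1 == some kv.2) &&
  d2.items.all (fun kv => d1.get? kv.1 == some kv.2)

-- B's loop over dic with the early 'return 1'
def pvLoopB (need : PySem.Dict String Int) : List String → Int
  | [] => 2
  | w :: rest =>
      if pvDictEq (pvCount (w.toList.map (fun c => String.ofList [c]))) need
      then 1 else pvLoopB need rest

def solution_alt (spell : List String) (dic : List String) : Int :=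
  pvLoopB (pvCount spell) dic

-- ===== PRECONDITION & SPEC =====
-- Pre_ excludes spells containing the two-character string "zz": there A's internal poison sentinel
-- 'zz' collides with a spell element (a later spell item "zz" can cancel a recorded miss), an accident
-- of the sentinel on inputs outside the intended one-letter-per-item domain; B treats "zz" as an
-- ordinary (never-matching) item there.
def Pre_solution (spell : List String) (dic : List String) : Prop := "zz" ∉ spell
instance (spell : List String) (dic : List String) : Decidable (Pre_solution spell dic) := by
  unfold Pre_solution; infer_instance

def pvWitness_solution : List String × List String := (["a", "b"], ["ba", "cd"])

def Spec_solution (spell : List String) (dic : List String) (out : Int) : Prop := out = solution_alt spell dic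
instance (spell : List String) (dic : List String) (out : Int) : Decidable (Spec_solution spell dic out) := by unfold Spec_solution; infer_instance

-- ===== CLAIM (what is proved, stated in full; the proofs are below) =====
def Claim_equal_solution : Prop := ∀ (spell : List String) (dic : List String), Dom_solution spell dic → Pre_solution spell dic → Spec_solution spell dic (solution spell dic)

-- ===== LEMMAS AND PROOFS =====

-- once "zz" is in A's working list and "zz" is not a remaining spell item, it stays
lemma pv_fold_mem_zz (js : List String) (hzz : "zz" ∉ js) :
    ∀ i : List String, "zz" ∈ i → "zz" ∈ js.foldl pvStepA i := by
  induction js with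
  | nil => intro i hi; simpa using hi
  | cons j rest ih =>
      intro i hi
      have hj : j ≠ "zz" := fun h => hzz (by simp [h])
      have hrest : "zz" ∉ rest := fun h => hzz (by simp [h])
      simp only [List.foldl_cons]
      apply ih hrest
      unfold pvStepA
      split
      · next hmem =>
          rw [PySem.List.remove?_eq_some_erase i j hmem]
          exact (List.mem_erase_of_ne (Ne.symm hj)).mpr hi
      · exact List.mem_append.mpr (Or.inl hi)

-- A's inner loop empties the list exactly when the list is a permutation of the spell
lemma pv_fold_empty_iff (js : List String) (hzz : "zz" ∉ js) :
    ∀ i : List String, "zz" ∉ i → (js.foldl pvStepA i = [] ↔ i.Perm js) := by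
  induction js with
  | nil => intro i _; simp [List.perm_nil]
  | cons j rest ih =>
      intro i hi
      have hj : j ≠ "zz" := fun h => hzz (by simp [h])
      have hrest : "zz" ∉ rest := fun h => hzz (by simp [h])
      simp only [List.foldl_cons]
      by_cases hmem : j ∈ i
      · have hstep : pvStepA i j = i.erase j := by
          unfold pvStepA
          rw [if_pos hmem, PySem.List.remove?_eq_some_erase i j hmem]; rfl
        rw [hstep]
        have hie : "zz" ∉ i.erase j := fun h => hi (List.mem_of_mem_erase h)
        rw [ih hrest _ hie]
        constructor
        · intro h
          exact ((List.cons_perm_iff_perm_erase).mpr ⟨hmem, h.symm⟩).symm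
        · intro h
          exact (((List.cons_perm_iff_perm_erase).mp h.symm).2).symm
      · have hstep : pvStepA i j = i ++ ["zz"] := by unfold pvStepA; rw [if_neg hmem]
        rw [hstep]
        have hz : "zz" ∈ rest.foldl pvStepA (i ++ ["zz"]) :=
          pv_fold_mem_zz rest hrest _ (List.mem_append.mpr (Or.inr (by simp)))
        constructor
        · intro h; rw [h] at hz; simp at hz
        · intro h; exact absurd (h.symm.mem_iff.mp (by simp)) hmem

lemma pv_pvCount_eq_counter (l : List String) : pvCount l = PySem.Dict.counter l := rfl

lemma pv_counter_get?_of_mem {l : List String} {k : String} (h : k ∈ l) :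
    (PySem.Dict.counter l).get? k = some (l.count k) := by
  refine PySem.Dict.get?_of_mem_items _ ?_ (PySem.Dict.nodup_keys_counter l)
  rw [PySem.Dict.items_counter]
  exact List.mem_map.mpr ⟨k, (PySem.Set.mem_ofList l k).mpr h, rfl⟩

lemma pv_counter_get?_eq_some_iff {l : List String} {k : String} {v : Int} :
    (PySem.Dict.counter l).get? k = some v ↔ k ∈ l ∧ v = l.count k := by
  constructor
  · intro h
    have hk : k ∈ l := by
      by_contra hk
      have : k ∉ (PySem.Dict.counter l).keys := by
        rw [PySem.Dict.keys_counter]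
        exact fun hm => hk ((PySem.Set.mem_ofList l k).mp hm)
      rw [(PySem.Dict.get?_eq_none_iff_not_mem_keys _ _).mpr this] at h
      exact absurd h (by simp)
    refine ⟨hk, ?_⟩
    have := pv_counter_get?_of_mem hk
    rw [this] at h
    exact (Option.some.injEq _ _ ▸ h).symm
  · rintro ⟨hk, rfl⟩
    exact pv_counter_get?_of_mem hk

-- Python's '==' on the two counters is multiset equality of the underlying lists
lemma pv_dictEq_counter_iff (l1 l2 : List String) :
    pvDictEq (pvCount l1) (pvCount l2) = true ↔ ∀ k, l1.count k = l2.count k := by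
  rw [pv_pvCount_eq_counter, pv_pvCount_eq_counter]
  unfold pvDictEq
  rw [Bool.and_eq_true, List.all_eq_true, List.all_eq_true]
  constructor
  · rintro ⟨h1, h2⟩ k
    by_cases hk1 : k ∈ l1
    · have hm : (k, (l1.count k : Int)) ∈ (PySem.Dict.counter l1).items := by
        rw [PySem.Dict.items_counter]
        exact List.mem_map.mpr ⟨k, (PySem.Set.mem_ofList l1 k).mpr hk1, rfl⟩
      have h1' := h1 _ hm
      dsimp only at h1'
      rw [beq_iff_eq] at h1'
      have := (pv_counter_get?_eq_some_iff.mp h1').2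
      exact_mod_cast this
    · by_cases hk2 : k ∈ l2
      · have hm : (k, (l2.count k : Int)) ∈ (PySem.Dict.counter l2).items := by
          rw [PySem.Dict.items_counter]
          exact List.mem_map.mpr ⟨k, (PySem.Set.mem_ofList l2 k).mpr hk2, rfl⟩
        have h2' := h2 _ hm
        dsimp only at h2'
        rw [beq_iff_eq] at h2'
        exact absurd (pv_counter_get?_eq_some_iff.mp h2').1 hk1
      · rw [List.count_eq_zero_of_not_mem hk1, List.count_eq_zero_of_not_mem hk2]
  · intro h
    constructor
    · intro kv hkv
      rw [PySem.Dict.items_counter] at hkv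
      obtain ⟨k, hk, rfl⟩ := List.mem_map.mp hkv
      have hk1 : k ∈ l1 := (PySem.Set.mem_ofList l1 k).mp hk
      have hk2 : k ∈ l2 := by
        rw [← List.count_pos_iff, ← h k, List.count_pos_iff]; exact hk1
      dsimp only
      rw [beq_iff_eq]
      exact pv_counter_get?_eq_some_iff.mpr ⟨hk2, by exact_mod_cast (h k)⟩
    · intro kv hkv
      rw [PySem.Dict.items_counter] at hkv
      obtain ⟨k, hk, rfl⟩ := List.mem_map.mp hkv
      have hk2 : k ∈ l2 := (PySem.Set.mem_ofList l2 k).mp hk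
      have hk1 : k ∈ l1 := by
        rw [← List.count_pos_iff, h k, List.count_pos_iff]; exact hk2
      dsimp only
      rw [beq_iff_eq]
      exact pv_counter_get?_eq_some_iff.mpr ⟨hk1, by exact_mod_cast (h k).symm⟩

-- per-word agreement of the two match tests
lemma pv_word_iff (spell : List String) (hzz : "zz" ∉ spell) (w : String) :
    (spell.foldl pvStepA
        (PySem.List.sorted (w.toList.map (fun c => String.ofList [c])) (fun x => x) false) = [])
      ↔ pvDictEq (pvCount (w.toList.map (fun c => String.ofList [c]))) (pvCount spell) = true := by
  set X := w.toList.map (fun c => String.ofList [c]) with hX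
  have hzX : "zz" ∉ PySem.List.sorted X (fun x => x) false := by
    intro hmem
    rw [PySem.List.mem_sorted] at hmem
    obtain ⟨c, _, hc⟩ := List.mem_map.mp hmem
    have h2 := congrArg (fun s => s.toList.length) hc
    simp at h2
  rw [pv_fold_empty_iff spell hzz _ hzX, pv_dictEq_counter_iff]
  constructor
  · intro h k
    have hperm : X.Perm spell := (PySem.List.sorted_perm X (fun x => x) false).symm.trans h
    exact hperm.count_eq k
  · intro h
    exact (PySem.List.sorted_perm X (fun x => x) false).trans
      ((List.perm_iff_count).mpr h)

lemma pv_loops_eq (spell : List String) (hzz : "zz" ∉ spell) :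
    ∀ dic : List String, pvLoopA spell dic = pvLoopB (pvCount spell) dic := by
  intro dic0
  induction dic0 with
  | nil => rfl
  | cons w rest ih =>
      unfold pvLoopA pvLoopB
      by_cases h : spell.foldl pvStepA
          (PySem.List.sorted (w.toList.map (fun c => String.ofList [c])) (fun x => x) false) = []
      · rw [if_pos h, if_pos ((pv_word_iff spell hzz w).mp h)]
      · rw [if_neg h, if_neg (fun hb => h ((pv_word_iff spell hzz w).mpr hb)), ih]

-- ===== VERDICT (by name: the statement is the Claim_ definition above) =====
theorem solution_spec : Claim_equal_solution := by
  intro spell dic _ hpre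
  unfold Spec_solution solution solution_alt
  exact pv_loops_eq spell hpre dic
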